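-- pv_equiv track=rewrite | github.com/dripowner/object-tracking-assignment | metrics.py | num_id_switches
-- ===== SOURCE A (Python) =====
-- from typing import List, Dict
--
-- def num_id_switches(predicted_ids: List) -> int:
--     curr_track = None
--     count = 0
--     for pred in range(len(predicted_ids) - 1):
--         if predicted_ids[pred] not in ["?", "not_detected"]:
--             curr_track = predicted_ids[pred]
--         if (predicted_ids[pred + 1] not in ["?", "not_detected"] and
--             predicted_ids[pred + 1] != curr_track and
--             curr_track is not None):
--             count += 1
--     return count
-- ===== SOURCE B (Python) =====
-- def num_id_switches(predicted_ids):
--     filtered = [x for x in predicted_ids if x not in ("?", "not_detected")]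
--     return sum(1 for x, y in zip(filtered, filtered[1:]) if x != y)
-- ===== Notes on version B (the rewrite author's own statement) =====
-- stated objective: simpler
-- what changed: Replaces the stateful carry-last-valid loop (curr_track/None guard over index pairs) with a filter that drops the placeholder sentinels followed by a stateless count of differing adjacent pairs via zip.
import Mathlib
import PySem

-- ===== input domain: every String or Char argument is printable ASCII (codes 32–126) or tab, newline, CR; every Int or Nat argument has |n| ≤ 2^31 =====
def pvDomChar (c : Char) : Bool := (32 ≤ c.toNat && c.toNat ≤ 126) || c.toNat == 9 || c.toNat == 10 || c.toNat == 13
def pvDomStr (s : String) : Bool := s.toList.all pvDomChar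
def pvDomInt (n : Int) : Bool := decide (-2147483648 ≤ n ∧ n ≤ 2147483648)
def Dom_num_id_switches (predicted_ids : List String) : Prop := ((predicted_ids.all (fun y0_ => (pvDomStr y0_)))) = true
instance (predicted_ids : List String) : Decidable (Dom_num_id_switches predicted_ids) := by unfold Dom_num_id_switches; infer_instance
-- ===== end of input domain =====

-- B replaces A's stateful carry-last-valid loop with a placeholder filter followed by a
-- stateless count of differing adjacent pairs (objective: simpler). Return values only; no mutation.

-- ===== PORT A =====
-- A's for-loop over index pairs (xs[pred], xs[pred+1]) as the obvious structural recursion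
-- over adjacent elements, carrying the same state (curr_track : Option String, count : Int).
def numIdSwitchesLoopA : Option String → Int → List String → Int
  | _, count, [] => count
  | _, count, [_] => count
  | curr, count, x :: y :: rest =>
      let curr' := if !(x == "?" || x == "not_detected") then some x else curr
      let count' :=
        if !(y == "?" || y == "not_detected") && (some y != curr') && curr'.isSome
        then count + 1 else count
      numIdSwitchesLoopA curr' count' (y :: rest)

def num_id_switches (predicted_ids : List String) : Int :=
  numIdSwitchesLoopA none 0 predicted_ids

-- ===== PORT B =====
def num_id_switches_alt (predicted_ids : List String) : Int :=
  let filtered := predicted_ids.filter (fun x => !(x == "?" || x == "not_detected"))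
  ((filtered.zip (filtered.drop 1)).filter (fun p => p.1 != p.2)).length

-- ===== PRECONDITION & SPEC =====
def Spec_num_id_switches (predicted_ids : List String) (out : Int) : Prop := out = num_id_switches_alt predicted_ids
instance (predicted_ids : List String) (out : Int) : Decidable (Spec_num_id_switches predicted_ids out) := by unfold Spec_num_id_switches; infer_instance

-- ===== CLAIM (what is proved, stated in full; the proofs are below) =====
def Claim_equal_num_id_switches : Prop := ∀ (predicted_ids : List String), Dom_num_id_switches predicted_ids → Spec_num_id_switches predicted_ids (num_id_switches predicted_ids)

-- ===== LEMMAS AND PROOFS =====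

-- proof-side: "x is not a placeholder"
def pvValid (x : String) : Bool := !(x == "?" || x == "not_detected")

-- proof-side spec: scan the list, counting each valid element that differs from the last valid one
def pvSw : Option String → List String → Int
  | _, [] => 0
  | curr, x :: rest =>
      if pvValid x then
        (match curr with
         | some c => if x != c then (1 : Int) else 0
         | none => 0) + pvSw (some x) rest
      else pvSw curr rest

-- proof-side: adjacent-differences count, B's shape
def pvAdj (l : List String) : Int :=
  ((l.zip (l.drop 1)).filter (fun p => p.1 != p.2)).length

theorem pvAdj_cons (a b : String) (r : List String) :
    pvAdj (a :: b :: r) = (if a != b then (1 : Int) else 0) + pvAdj (b :: r) := by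
  simp only [pvAdj, List.drop, List.zip_cons_cons, List.filter]
  by_cases h : a = b
  · simp [h]
  · have hb : (a != b) = true := by simp [h]
    simp [hb]
    omega

-- A's loop equals count + pvSw of the updated state on the tail
theorem loopA_eq_sw (l : List String) : ∀ (x : String) (curr : Option String) (count : Int),
    numIdSwitchesLoopA curr count (x :: l)
      = count + pvSw (if pvValid x then some x else curr) l := by
  induction l with
  | nil => intro x curr count; simp [numIdSwitchesLoopA, pvSw]
  | cons y rest ih =>
      intro x curr count
      rw [numIdSwitchesLoopA, ih]
      simp only [pvValid, pvSw]
      by_cases hy : (y == "?" || y == "not_detected") = true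
      · simp [hy]
      · simp only [Bool.not_eq_true] at hy
        by_cases hx : (x == "?" || x == "not_detected") = true
        · simp only [hx, hy, Bool.not_true, Bool.not_false, Bool.true_and,
            Bool.false_eq_true, if_false, if_true]
          cases curr <;> simp [Option.isSome] <;> split_ifs <;>
            simp_all [bne_iff_ne] <;> omega
        · simp only [Bool.not_eq_true] at hx
          simp only [hx, hy, Bool.not_true, Bool.not_false, Bool.true_and,
            Bool.false_eq_true, if_false, if_true]
          cases curr <;> simp [Option.isSome] <;> split_ifs <;>
            simp_all [bne_iff_ne] <;> omega

-- pvSw equals adjacent-differences of the filtered list (with/without a seed)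
theorem sw_eq_adj (l : List String) :
    (∀ c, pvSw (some c) l = pvAdj (c :: l.filter pvValid)) ∧
      pvSw none l = pvAdj (l.filter pvValid) := by
  induction l with
  | nil => exact ⟨fun c => rfl, rfl⟩
  | cons x rest ih =>
      obtain ⟨ihs, ihn⟩ := ih
      by_cases hx : pvValid x = true
      · constructor
        · intro c
          simp only [pvSw, hx, if_true, List.filter_cons, pvAdj_cons, ihs x]
          rw [bne_comm (a := x) (b := c)]
        · simp only [pvSw, hx, if_true, List.filter_cons, ihs x]
          rw [Int.zero_add]
      · constructor
        · intro c
          simp only [pvSw, hx, List.filter_cons, Bool.false_eq_true, if_false, ihs]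
        · simp only [pvSw, hx, List.filter_cons, Bool.false_eq_true, if_false, ihn]

-- ===== VERDICT (by name: the statement is the Claim_ definition above) =====
theorem num_id_switches_spec : Claim_equal_num_id_switches := by
  intro xs _
  show num_id_switches xs = num_id_switches_alt xs
  have halt : num_id_switches_alt xs = pvAdj (xs.filter pvValid) := rfl
  rw [halt]
  cases xs with
  | nil => rfl
  | cons x l =>
      rw [show num_id_switches (x :: l) = numIdSwitchesLoopA none 0 (x :: l) from rfl,
        loopA_eq_sw]
      by_cases hx : pvValid x = true
      · simp only [hx, if_true, List.filter_cons, (sw_eq_adj l).1 x]; omega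
      · simp only [hx, Bool.false_eq_true, if_false, List.filter_cons, (sw_eq_adj l).2]
        omega
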